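-- pv_equiv track=rewrite | github.com/uzaktantakip000-create/piyasa_chat_bot | backend/behavior/bot_selector.py | _time_matches_ranges
-- ===== SOURCE A (Python) =====
-- from typing import List, Optional
--
-- def parse_ranges(ranges: List[str]) -> List[tuple]:
--     """
--     Parse time range strings into minute-of-day tuples.
--
--     Converts "HH:MM-HH:MM" strings to (start_minutes, end_minutes) tuples.
--     Minutes are calculated from midnight (00:00).
--
--     Examples:
--         >>> parse_ranges(["09:30-12:00", "14:00-18:00"])
--         [(570, 720), (840, 1080)]
--
--     Args:
--         ranges: List of time range strings in "HH:MM-HH:MM" format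
--
--     Returns:
--         List of (start_minutes, end_minutes) tuples
--     """
--     out = []
--     for r in ranges or []:
--         try:
--             a, b = r.split("-")
--             sh, sm = [int(x) for x in a.split(":")]
--             eh, em = [int(x) for x in b.split(":")]
--             out.append((sh * 60 + sm, eh * 60 + em))
--         except Exception:
--             continue
--     return out
--
-- def _time_matches_ranges(ranges: List[str], minute_of_day: int) -> bool:
--     """
--     Check if a minute-of-day falls within any time range.
--
--     Handles ranges that cross midnight (e.g., "22:00-02:00").
--
--     Args:
--         ranges: List of time range strings
--         minute_of_day: Minutes since midnight (0-1439)
--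
--     Returns:
--         True if minute_of_day is within any range
--     """
--     for (s, e) in parse_ranges(ranges):
--         if s <= e:
--             # Normal range (e.g., 09:00-18:00)
--             if s <= minute_of_day <= e:
--                 return True
--         else:
--             # Midnight-crossing range (e.g., 22:00-02:00)
--             if minute_of_day >= s or minute_of_day <= e:
--                 return True
--     return False
-- ===== SOURCE B (Python) =====
-- def parse_ranges(ranges):
--     out = []
--     for r in ranges or []:
--         try:
--             a, b = r.split("-")
--             sh, sm = [int(x) for x in a.split(":")]
--             eh, em = [int(x) for x in b.split(":")]
--             out.append((sh * 60 + sm, eh * 60 + em))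
--         except Exception:
--             continue
--     return out
--
-- def _le(a, b):
--     """a <= b where None stands for -inf on the left / +inf on the right."""
--     return a is None or b is None or a <= b
--
-- def _min_lo(a, b):
--     """min of two lower bounds (None = -inf)."""
--     return None if a is None or b is None else min(a, b)
--
-- def _max_hi(a, b):
--     """max of two upper bounds (None = +inf)."""
--     return None if a is None or b is None else max(a, b)
--
-- def _time_matches_ranges(ranges, minute_of_day):
--     # Interval-merge algorithm in three stages.
--     # Stage 1: normalize every parsed range into closed intervals with optional
--     # (unbounded) endpoints; a midnight-crossing range (s > e) becomes the two
--     # rays [s, +inf) and (-inf, e].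
--     intervals = []
--     for (s, e) in parse_ranges(ranges):
--         if s <= e:
--             intervals.append((s, e))
--         else:
--             intervals.append((s, None))
--             intervals.append((None, e))
--     # Stage 2: sort by lower bound (None = -inf first) and merge intersecting
--     # intervals into one disjoint ordered interval list.
--     intervals.sort(key=lambda iv: (iv[0] is not None, 0 if iv[0] is None else iv[0]))
--     merged = []
--     for lo, hi in intervals:
--         if merged and _le(lo, merged[-1][1]) and _le(merged[-1][0], hi):
--             mlo, mhi = merged[-1]
--             merged[-1] = (_min_lo(mlo, lo), _max_hi(mhi, hi))
--         else:
--             merged.append((lo, hi))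
--     # Stage 3: one uniform membership scan over the disjoint list.
--     return any(_le(lo, minute_of_day) and _le(minute_of_day, hi)
--                for lo, hi in merged)
-- ===== Notes on version B (the rewrite author's own statement) =====
-- stated objective: alternative
-- what changed: B replaces A's branch-per-range scan by an interval-merge algorithm: each parsed range is normalized into closed intervals with optional unbounded endpoints (a midnight-crossing range splits into two rays), the intervals are sorted by lower bound and merged into a disjoint ordered list, and membership is then one uniform scan with no normal/wraparound case split.
import Mathlib
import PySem

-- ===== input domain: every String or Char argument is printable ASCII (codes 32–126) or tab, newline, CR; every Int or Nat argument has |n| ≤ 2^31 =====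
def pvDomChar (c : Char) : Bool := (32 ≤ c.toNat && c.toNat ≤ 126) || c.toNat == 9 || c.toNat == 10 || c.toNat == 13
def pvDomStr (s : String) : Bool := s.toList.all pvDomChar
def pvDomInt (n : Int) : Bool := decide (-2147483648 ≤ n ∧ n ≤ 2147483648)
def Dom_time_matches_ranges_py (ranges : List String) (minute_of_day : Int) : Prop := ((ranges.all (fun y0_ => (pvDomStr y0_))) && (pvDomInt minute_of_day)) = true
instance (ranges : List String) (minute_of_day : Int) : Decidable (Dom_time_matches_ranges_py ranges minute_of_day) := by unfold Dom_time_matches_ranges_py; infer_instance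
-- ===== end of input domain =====

-- B replaces A's branch-per-range scan by a staged interval-merge algorithm
-- (normalize to optionally-unbounded intervals, sort, merge, uniform membership scan).


-- ===== PORT A =====
-- shared sub-parse used verbatim by both Pythons: "sh, sm = [int(x) for x in p.split(":")]"
-- as hours*60+minutes, none on any exception. split? with a nonempty literal separator is
-- always `some` (`.getD []` only discharges that impossible `none`); PySem.Int.ofStr? is int(str).
def pvHM? (p : String) : Option Int :=
  match ((PySem.Str.split? p ":").getD []).map PySem.Int.ofStr? with
  | [some h, some m] => some (h * 60 + m)
  | _ => none

-- loop body of parse_ranges: try to parse r and append; on any failure keep `out`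
def pvParseStep (out : List (Int × Int)) (r : String) : List (Int × Int) :=
  match PySem.Str.split? r "-" with
  | some [a, b] =>
    match pvHM? a, pvHM? b with
    | some s, some e => out ++ [(s, e)]
    | _, _ => out
  | _ => out

def parse_ranges_py (ranges : List String) : List (Int × Int) :=
  ranges.foldl pvParseStep []

-- the for-loop of _time_matches_ranges with its early `return True`
def pvCheckA (minute_of_day : Int) : List (Int × Int) → Bool
  | [] => false
  | (s, e) :: rest =>
    if s ≤ e then
      if s ≤ minute_of_day ∧ minute_of_day ≤ e then true else pvCheckA minute_of_day rest
    else
      if minute_of_day ≥ s ∨ minute_of_day ≤ e then true else pvCheckA minute_of_day rest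

def time_matches_ranges_py (ranges : List String) (minute_of_day : Int) : Bool :=
  pvCheckA minute_of_day (parse_ranges_py ranges)

-- ===== PORT B =====
-- Source B's _le: a <= b where none = -inf on the left / +inf on the right
def pvLe : Option Int → Option Int → Bool
  | none, _ => true
  | _, none => true
  | some a, some b => a ≤ b

-- Source B's _min_lo / _max_hi (none = -inf resp. +inf)
def pvMinLo : Option Int → Option Int → Option Int
  | none, _ => none
  | _, none => none
  | some a, some b => some (min a b)

def pvMaxHi : Option Int → Option Int → Option Int
  | none, _ => none
  | _, none => none
  | some a, some b => some (max a b)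

-- Stage 1 loop body: normalize one parsed pair into intervals
def pvExpandStep (acc : List (Option Int × Option Int)) (p : Int × Int) :
    List (Option Int × Option Int) :=
  if p.1 ≤ p.2 then acc ++ [(some p.1, some p.2)]
  else acc ++ [(some p.1, none), (none, some p.2)]

-- Stage 2 loop body: merge an interval into merged[-1] when they intersect
def pvMergeStep (merged : List (Option Int × Option Int)) (iv : Option Int × Option Int) :
    List (Option Int × Option Int) :=
  match merged.getLast? with
  | some (mlo, mhi) =>
    if pvLe iv.1 mhi && pvLe mlo iv.2 then
      merged.dropLast ++ [(pvMinLo mlo iv.1, pvMaxHi mhi iv.2)]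
    else merged ++ [iv]
  | none => merged ++ [iv]

def time_matches_ranges_py_alt (ranges : List String) (minute_of_day : Int) : Bool :=
  ((PySem.List.sorted2 ((parse_ranges_py ranges).foldl pvExpandStep [])
      (fun iv => if iv.1.isSome then (1 : Int) else 0)
      (fun iv => iv.1.getD 0)).foldl pvMergeStep []).any
    (fun iv => pvLe iv.1 (some minute_of_day) && pvLe (some minute_of_day) iv.2)

-- ===== PRECONDITION & SPEC =====
def Spec_time_matches_ranges_py (ranges : List String) (minute_of_day : Int) (out : Bool) : Prop := out = time_matches_ranges_py_alt ranges minute_of_day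
instance (ranges : List String) (minute_of_day : Int) (out : Bool) : Decidable (Spec_time_matches_ranges_py ranges minute_of_day out) := by unfold Spec_time_matches_ranges_py; infer_instance

-- ===== CLAIM =====
def Claim_equal_time_matches_ranges_py : Prop := ∀ (ranges : List String) (minute_of_day : Int), Dom_time_matches_ranges_py ranges minute_of_day → Spec_time_matches_ranges_py ranges minute_of_day (time_matches_ranges_py ranges minute_of_day)

-- ===== LEMMAS AND PROOFS =====
-- membership of m in an optionally-unbounded interval
def pvMem (m : Int) (iv : Option Int × Option Int) : Bool :=
  pvLe iv.1 (some m) && pvLe (some m) iv.2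

theorem pvCheckA_eq_any (m : Int) (ps : List (Int × Int)) :
    pvCheckA m ps = ps.any (fun p =>
      if p.1 ≤ p.2 then decide (p.1 ≤ m ∧ m ≤ p.2) else decide (m ≥ p.1 ∨ m ≤ p.2)) := by
  induction ps with
  | nil => rfl
  | cons p rest ih =>
    obtain ⟨s, e⟩ := p
    rw [pvCheckA, List.any_cons, ← ih]
    by_cases h : s ≤ e <;> simp [h]

theorem expand_any (m : Int) (ps : List (Int × Int)) (acc : List (Option Int × Option Int)) :
    (ps.foldl pvExpandStep acc).any (pvMem m)
      = (acc.any (pvMem m) || ps.any (fun p =>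
          if p.1 ≤ p.2 then decide (p.1 ≤ m ∧ m ≤ p.2) else decide (m ≥ p.1 ∨ m ≤ p.2))) := by
  induction ps generalizing acc with
  | nil => simp
  | cons p rest ih =>
    obtain ⟨s, e⟩ := p
    rw [List.foldl_cons, ih, List.any_cons]
    unfold pvExpandStep
    by_cases h : s ≤ e <;> simp [h, pvMem, pvLe, Bool.or_assoc]

theorem mergeJoin_mem (m : Int) (mlo mhi lo hi : Option Int)
    (hov : (pvLe lo mhi && pvLe mlo hi) = true) :
    pvMem m (pvMinLo mlo lo, pvMaxHi mhi hi) = (pvMem m (mlo, mhi) || pvMem m (lo, hi)) := by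
  cases mlo <;> cases mhi <;> cases lo <;> cases hi <;>
    simp_all [pvMem, pvLe, pvMinLo, pvMaxHi] <;> (try omega) <;>
    (rw [Bool.eq_iff_iff]; simp only [Bool.or_eq_true, Bool.and_eq_true, decide_eq_true_eq]; omega)

theorem mergeStep_any (m : Int) (merged : List (Option Int × Option Int))
    (iv : Option Int × Option Int) :
    (pvMergeStep merged iv).any (pvMem m) = (merged.any (pvMem m) || pvMem m iv) := by
  obtain ⟨lo, hi⟩ := iv
  unfold pvMergeStep
  cases hl : merged.getLast? with
  | none => simp
  | some p =>
    obtain ⟨mlo, mhi⟩ := p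
    have hne : merged ≠ [] := by
      intro h; rw [h] at hl; simp at hl
    have hsplit : merged = merged.dropLast ++ [(mlo, mhi)] := by
      conv_lhs => rw [← List.dropLast_append_getLast hne]
      rw [List.getLast_eq_iff_getLast?_eq_some hne |>.mpr hl]
    by_cases hov : (pvLe lo mhi && pvLe mlo hi) = true
    · simp only [hov, if_true]
      rw [List.any_append]
      conv_rhs => rw [hsplit, List.any_append]
      simp only [List.any_cons, List.any_nil, Bool.or_false]
      rw [mergeJoin_mem m mlo mhi lo hi hov]
      simp [Bool.or_assoc]
    · simp only [hov]
      simp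
theorem merge_any (m : Int) (ivs acc : List (Option Int × Option Int)) :
    (ivs.foldl pvMergeStep acc).any (pvMem m) = (acc.any (pvMem m) || ivs.any (pvMem m)) := by
  induction ivs generalizing acc with
  | nil => simp
  | cons iv rest ih =>
    rw [List.foldl_cons, ih, mergeStep_any, List.any_cons, Bool.or_assoc]

-- ===== VERDICT =====
theorem time_matches_ranges_py_spec : Claim_equal_time_matches_ranges_py := by
  intro ranges m _
  unfold Spec_time_matches_ranges_py time_matches_ranges_py time_matches_ranges_py_alt
  rw [show (fun iv : Option Int × Option Int => pvLe iv.1 (some m) && pvLe (some m) iv.2)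
        = pvMem m from rfl, merge_any]
  have hperm := PySem.List.sorted2_perm ((parse_ranges_py ranges).foldl pvExpandStep [])
      (fun iv : Option Int × Option Int => if iv.1.isSome then (1 : Int) else 0)
      (fun iv => iv.1.getD 0) (rev := false)
  rw [hperm.any_eq, expand_any, pvCheckA_eq_any]
  simp
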